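-- pv_equiv track=rewrite | github.com/nobbydoo80/axis-backend | axis/checklist/utils.py | get_min_length_for_unique_items
-- ===== SOURCE A (Python) =====
-- def get_min_length_for_unique_items(items):
--     min_length = 1
--     while True:
--         shortest = [" ".join(q.split()[0:min_length]) for q in items]
--         if len(list(set(shortest))) == len(items):
--             break
--         min_length += 1
--     return min_length
-- ===== SOURCE B (Python) =====
-- def get_min_length_for_unique_items(items):
--     # Split once, sort the word lists; the answer is one more than the largest
--     # word-level common prefix, which in sorted order occurs between neighbours.
--     word_lists = sorted(q.split() for q in items)
--     best = 0
--     for a, b in zip(word_lists, word_lists[1:]):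
--         n = 0
--         for x, y in zip(a, b):
--             if x != y:
--                 break
--             n += 1
--         if n > best:
--             best = n
--     return best + 1
-- ===== Notes on version B (the rewrite author's own statement) =====
-- stated objective: alternative
-- what changed: A repeatedly rebuilds all length-m word prefixes and a set of them for m = 1, 2, ... until they are unique; B splits each item once, sorts the word lists, and returns 1 + the maximum word-level longest-common-prefix between adjacent sorted lists. Pre_ excludes lists with two items having the same whitespace-split word list, on which A loops forever.
import Mathlib
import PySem

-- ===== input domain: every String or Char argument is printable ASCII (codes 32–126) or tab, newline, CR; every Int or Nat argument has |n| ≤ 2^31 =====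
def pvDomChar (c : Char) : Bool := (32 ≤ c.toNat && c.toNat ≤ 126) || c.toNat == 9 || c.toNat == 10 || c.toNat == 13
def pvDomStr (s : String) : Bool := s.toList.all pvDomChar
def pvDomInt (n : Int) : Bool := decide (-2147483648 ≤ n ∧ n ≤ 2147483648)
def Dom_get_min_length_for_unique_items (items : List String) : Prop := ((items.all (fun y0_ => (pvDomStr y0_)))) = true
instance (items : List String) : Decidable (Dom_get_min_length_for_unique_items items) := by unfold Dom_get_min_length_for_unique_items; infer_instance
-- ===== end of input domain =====

-- B splits each item once, sorts the word lists and returns 1 + the largest adjacent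
-- word-level common prefix, instead of A's retry loop that rebuilds every prefix and a
-- set of them for each candidate length (a single sort-and-scan pass in place of A's
-- guess-and-recheck loop).


-- ===== PORT A =====
-- 'while True: … min_length += 1' ported with fuel; the fuel only makes the loop total:
-- under Pre_ the loop stops at the latest at (max word count) + 1, which the fuel covers.
def pvALoop (items : List String) : Nat → Int → Int
  | 0, min_length => min_length
  | fuel + 1, min_length =>
    let shortest := items.map (fun q =>
      PySem.Str.join " " (PySem.List.slice (PySem.Str.split₀ q) (some 0) (some min_length)))
    if (PySem.Set.ofList shortest).length = items.length then min_length
    else pvALoop items fuel (min_length + 1)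

def get_min_length_for_unique_items (items : List String) : Int :=
  pvALoop items (items.foldl (fun acc q => max acc (PySem.Str.split₀ q).length) 0 + 1) 1

-- ===== PORT B =====
-- inner loop: 'for x, y in zip(a, b): if x != y: break; n += 1'
def pvLcp : List String → List String → Nat
  | x :: xs, y :: ys => if x = y then pvLcp xs ys + 1 else 0
  | _, _ => 0

-- 'for a, b in zip(word_lists, word_lists[1:]): if n > best: best = n'
def pvBestLoop : List (List String) → Nat → Nat
  | a :: b :: rest, best => pvBestLoop (b :: rest) (max best (pvLcp a b))
  | _, best => best

def get_min_length_for_unique_items_alt (items : List String) : Int :=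
  let word_lists := @PySem.List.sorted (List String) (List String) List.instLinearOrder.toLT
    LinearOrder.toDecidableLT (items.map (fun q => PySem.Str.split₀ q)) (fun x => x) false
  (pvBestLoop word_lists 0 : Int) + 1

-- ===== PRECONDITION & SPEC =====
-- Pre_ excludes exactly the lists in which two items have the same whitespace-split word
-- list: there A's while loop never finds distinct prefixes and loops forever (no return).
def Pre_get_min_length_for_unique_items (items : List String) : Prop :=
  (items.map PySem.Str.split₀).Nodup
instance (items : List String) : Decidable (Pre_get_min_length_for_unique_items items) := by
  unfold Pre_get_min_length_for_unique_items; infer_instance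

def pvWitness_get_min_length_for_unique_items : List String := ["a", "a b", "c"]

def Spec_get_min_length_for_unique_items (items : List String) (out : Int) : Prop :=
  out = get_min_length_for_unique_items_alt items
instance (items : List String) (out : Int) : Decidable (Spec_get_min_length_for_unique_items items out) := by
  unfold Spec_get_min_length_for_unique_items; infer_instance

-- ===== CLAIM (what is proved, stated in full; the proofs are below) =====
def Claim_equal_get_min_length_for_unique_items : Prop :=
  ∀ (items : List String), Dom_get_min_length_for_unique_items items →
    Pre_get_min_length_for_unique_items items →
    Spec_get_min_length_for_unique_items items (get_min_length_for_unique_items items)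

-- ===== LEMMAS AND PROOFS =====

-- A word produced by str.split(): nonempty and free of whitespace (hence of ' ').
lemma pvSplitGoWords (s : List Char) : ∀ (cur : List Char) (acc : List (List Char)),
    (∀ c ∈ cur, PySem.Chars.isspace c = false) →
    (∀ w ∈ acc, w ≠ [] ∧ ∀ c ∈ w, PySem.Chars.isspace c = false) →
    ∀ w ∈ PySem.Chars.split₀.go s cur acc, w ≠ [] ∧ ∀ c ∈ w, PySem.Chars.isspace c = false := by
  induction s with
  | nil =>
    intro cur acc hcur hacc w hw
    simp only [PySem.Chars.split₀.go] at hw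
    split at hw
    · simp only [List.mem_reverse] at hw; exact hacc w hw
    · simp only [List.mem_reverse, List.mem_cons] at hw
      rcases hw with h | h
      · subst h
        rename_i hne
        have hcne : cur ≠ [] := by simpa using hne
        refine ⟨by simpa [List.reverse_eq_nil_iff] using hcne, ?_⟩
        intro c hc; exact hcur c (by simpa using hc)
      · exact hacc w h
  | cons c rest ih =>
    intro cur acc hcur hacc w hw
    simp only [PySem.Chars.split₀.go] at hw
    split at hw
    · split at hw
      · exact ih [] acc (by simp) hacc w hw
      · refine ih [] (cur.reverse :: acc) (by simp) ?_ w hw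
        intro w' hw'
        rcases List.mem_cons.mp hw' with h | h
        · subst h
          rename_i hsp hne
          have hcne : cur ≠ [] := by simpa using hne
          refine ⟨by simpa [List.reverse_eq_nil_iff] using hcne, ?_⟩
          intro c' hc'; exact hcur c' (by simpa using hc')
        · exact hacc w' h
    · rename_i hsp
      rw [Bool.not_eq_true] at hsp
      refine ih (c :: cur) acc ?_ hacc w hw
      intro c' hc'
      rcases List.mem_cons.mp hc' with h | h
      · subst h; exact hsp
      · exact hcur c' h

lemma pvSplitWords (q : String) :
    ∀ w ∈ PySem.Str.split₀ q, w.toList ≠ [] ∧ ' ' ∉ w.toList := by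
  intro w hw
  simp only [PySem.Str.split₀, List.mem_map] at hw
  obtain ⟨cs, hcs, rfl⟩ := hw
  have h := pvSplitGoWords q.toList [] [] (by simp) (by simp) cs hcs
  have htl : (String.ofList cs).toList = cs := by simp
  rw [htl]
  refine ⟨h.1, ?_⟩
  intro hsp
  have := h.2 ' ' hsp
  simp [PySem.Chars.isspace] at this

-- injectivity of ' '.join on lists of nonempty space-free words (char level)
lemma pvHeadSep (a : List Char) : ∀ (b r1 r2 : List Char), ' ' ∉ a → ' ' ∉ b →
    (r1 = [] ∨ ∃ t, r1 = ' ' :: t) → (r2 = [] ∨ ∃ t, r2 = ' ' :: t) →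
    a ++ r1 = b ++ r2 → a = b := by
  induction a with
  | nil =>
    intro b r1 r2 _ hb h1 h2 h
    cases b with
    | nil => rfl
    | cons d b' =>
      exfalso
      simp only [List.nil_append, List.cons_append] at h
      rcases h1 with rfl | ⟨t, rfl⟩
      · exact (by simpa using congrArg List.length h : False)
      · have : d = ' ' := by
          have := congrArg List.head? h; simpa using this.symm
        exact hb (this ▸ List.mem_cons_self)
  | cons c a' ih =>
    intro b r1 r2 ha hb h1 h2 h
    cases b with
    | nil =>
      exfalso
      simp only [List.cons_append, List.nil_append] at h
      rcases h2 with rfl | ⟨t, rfl⟩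
      · exact (by simpa using congrArg List.length h : False)
      · have : c = ' ' := by have := congrArg List.head? h; simpa using this
        exact ha (this ▸ List.mem_cons_self)
    | cons d b' =>
      simp only [List.cons_append, List.cons.injEq] at h
      obtain ⟨rfl, h⟩ := h
      have := ih b' r1 r2 (fun hm => ha (List.mem_cons_of_mem _ hm))
        (fun hm => hb (List.mem_cons_of_mem _ hm)) h1 h2 h
      rw [this]

lemma pvInterCons2 (a b : List Char) (l : List (List Char)) :
    [' '].intercalate (a :: b :: l) = a ++ ' ' :: [' '].intercalate (b :: l) := by
  simp [List.intercalate, List.intersperse]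

lemma pvJoinInjC (us : List (List Char)) : ∀ (vs : List (List Char)),
    (∀ w ∈ us, w ≠ [] ∧ ' ' ∉ w) → (∀ w ∈ vs, w ≠ [] ∧ ' ' ∉ w) →
    [' '].intercalate us = [' '].intercalate vs → us = vs := by
  induction us with
  | nil =>
    intro vs _ hv h
    cases vs with
    | nil => rfl
    | cons v vs' =>
      exfalso
      have hne : [' '].intercalate (v :: vs') ≠ [] := by
        cases vs' with
        | nil => simpa [List.intercalate] using (hv v (by simp)).1
        | cons v' t =>
          rw [pvInterCons2]
          intro hh
          exact (hv v (by simp)).1 (by simpa using congrArg (List.take v.length) hh)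
      exact hne (by simpa [List.intercalate] using h.symm)
  | cons u us' ih =>
    intro vs hu hv h
    cases vs with
    | nil =>
      exfalso
      have hne : [' '].intercalate (u :: us') ≠ [] := by
        cases us' with
        | nil => simpa [List.intercalate] using (hu u (by simp)).1
        | cons u' t =>
          rw [pvInterCons2]
          intro hh
          exact (hu u (by simp)).1 (by simpa using congrArg (List.take u.length) hh)
      exact hne (by simpa [List.intercalate] using h)
    | cons v vs' =>
      have hru : [' '].intercalate (u :: us') = u ++ (if us' = [] then [] else ' ' :: [' '].intercalate us') := by
        cases us' with
        | nil => simp [List.intercalate]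
        | cons x t => rw [pvInterCons2]; simp
      have hrv : [' '].intercalate (v :: vs') = v ++ (if vs' = [] then [] else ' ' :: [' '].intercalate vs') := by
        cases vs' with
        | nil => simp [List.intercalate]
        | cons x t => rw [pvInterCons2]; simp
      rw [hru, hrv] at h
      have huv : u = v := by
        refine pvHeadSep u v _ _ (hu u (by simp)).2 (hv v (by simp)).2 ?_ ?_ h
        · split_ifs with hc
          · exact Or.inl rfl
          · exact Or.inr ⟨_, rfl⟩
        · split_ifs with hc
          · exact Or.inl rfl
          · exact Or.inr ⟨_, rfl⟩
      subst huv
      have hrest := List.append_cancel_left h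
      by_cases h1 : us' = [] <;> by_cases h2 : vs' = []
      · rw [h1, h2]
      · exfalso; rw [if_pos h1, if_neg h2] at hrest; exact (by simpa using congrArg List.length hrest)
      · exfalso; rw [if_neg h1, if_pos h2] at hrest; exact (by simpa using congrArg List.length hrest)
      · rw [if_neg h1, if_neg h2] at hrest
        simp only [List.cons.injEq, true_and] at hrest
        rw [ih vs' (fun w hw => hu w (List.mem_cons_of_mem _ hw))
          (fun w hw => hv w (List.mem_cons_of_mem _ hw)) hrest]

lemma pvJoinInj (us vs : List String)
    (hu : ∀ w ∈ us, w.toList ≠ [] ∧ ' ' ∉ w.toList)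
    (hv : ∀ w ∈ vs, w.toList ≠ [] ∧ ' ' ∉ w.toList)
    (h : PySem.Str.join " " us = PySem.Str.join " " vs) : us = vs := by
  have hc : [' '].intercalate (us.map String.toList) = [' '].intercalate (vs.map String.toList) := by
    have := congrArg String.toList h
    rw [PySem.Str.toList_join, PySem.Str.toList_join] at this
    simpa [PySem.Chars.join] using this
  have := pvJoinInjC (us.map String.toList) (vs.map String.toList)
    (by intro w hw; obtain ⟨s, hs, rfl⟩ := List.mem_map.mp hw; exact hu s hs)
    (by intro w hw; obtain ⟨s, hs, rfl⟩ := List.mem_map.mp hw; exact hv s hs) hc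
  exact List.map_injective_iff.mpr (fun a b hab => String.toList_inj.mp hab) this

-- pvLcp facts
lemma pvLcp_comm (u : List String) : ∀ v, pvLcp u v = pvLcp v u := by
  induction u with
  | nil => intro v; cases v <;> simp [pvLcp]
  | cons x xs ih =>
    intro v
    cases v with
    | nil => simp [pvLcp]
    | cons y ys =>
      simp only [pvLcp]
      by_cases h : x = y
      · subst h; simp [ih]
      · simp [h, Ne.symm h]

lemma pvLcp_le (u : List String) : ∀ v, pvLcp u v ≤ u.length := by
  induction u with
  | nil => intro v; cases v <;> simp [pvLcp]
  | cons x xs ih =>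
    intro v
    cases v with
    | nil => simp [pvLcp]
    | cons y ys =>
      simp only [pvLcp, List.length_cons]
      split_ifs
      · exact Nat.succ_le_succ (ih ys)
      · omega

lemma pvLcp_self (u : List String) : pvLcp u u = u.length := by
  induction u with
  | nil => simp [pvLcp]
  | cons x xs ih => simp [pvLcp, ih]

lemma pvTake_lcp (u : List String) : ∀ v, u.take (pvLcp u v) = v.take (pvLcp u v) := by
  induction u with
  | nil => intro v; cases v <;> simp [pvLcp]
  | cons x xs ih =>
    intro v
    cases v with
    | nil => simp [pvLcp]
    | cons y ys =>
      simp only [pvLcp]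
      split_ifs with h
      · subst h; simp [List.take_succ_cons, ih]
      · simp

lemma pvTake_eq_iff (u : List String) : ∀ v m, u ≠ v → (u.take m = v.take m ↔ m ≤ pvLcp u v) := by
  induction u with
  | nil =>
    intro v m h
    cases v with
    | nil => exact absurd rfl h
    | cons y ys =>
      simp only [pvLcp, List.take_nil, Nat.le_zero]
      constructor
      · intro hh; cases m with
        | zero => rfl
        | succ k => simp at hh
      · intro hh; subst hh; simp
  | cons x xs ih =>
    intro v m h
    cases v with
    | nil =>
      simp only [pvLcp, List.take_nil, Nat.le_zero]
      constructor
      · intro hh; cases m with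
        | zero => rfl
        | succ k => simp at hh
      · intro hh; subst hh; simp
    | cons y ys =>
      cases m with
      | zero => simp
      | succ k =>
        simp only [List.take_succ_cons, pvLcp]
        by_cases hxy : x = y
        · subst hxy
          rw [if_pos rfl]
          simp only [List.cons.injEq, true_and]
          have hne : xs ≠ ys := fun hh => h (by rw [hh])
          rw [ih ys k hne]
          omega
        · simp only [if_neg hxy, List.cons.injEq]
          constructor
          · rintro ⟨rfl, -⟩; exact absurd rfl hxy
          · omega

-- lexicographic sandwich: a list between two lists sharing a prefix shares it too
lemma pvBetween (k : Nat) : ∀ (a b c : List String),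
    (List.Lex (· < ·) a b ∨ a = b) → (List.Lex (· < ·) b c ∨ b = c) →
    a.take k = c.take k → b.take k = a.take k := by
  induction k with
  | zero => intro a b c _ _ _; simp
  | succ k ih =>
    intro a b c hab hbc h
    rcases hab with hab | rfl; swap
    · rfl
    rcases hbc with hbc | rfl; swap
    · exact h.symm
    cases a with
    | nil =>
      cases c with
      | nil => cases hbc
      | cons z c' => simp at h
    | cons x a' =>
      cases c with
      | nil => simp at h
      | cons z c' =>
        simp only [List.take_succ_cons, List.cons.injEq] at h
        obtain ⟨rfl, h'⟩ := h
        cases b with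
        | nil => cases hab
        | cons y b' =>
          have hxy : x = y ∧ (List.Lex (· < ·) a' b' ∨ a' = b') := by
            cases hab with
            | cons hl => exact ⟨rfl, Or.inl hl⟩
            | rel hr =>
              cases hbc with
              | cons hl2 => exact absurd hr (lt_irrefl _)
              | rel hr2 => exact absurd (hr.trans hr2) (lt_irrefl _)
          obtain ⟨rfl, hab'⟩ := hxy
          have hbc' : List.Lex (· < ·) b' c' ∨ b' = c' := by
            cases hbc with
            | cons hl2 => exact Or.inl hl2
            | rel hr2 => exact absurd hr2 (lt_irrefl _)
          simp only [List.take_succ_cons, List.cons.injEq, true_and]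
          exact ih a' b' c' hab' hbc' h'

lemma pvLe_iff (a b : List String) : a ≤ b ↔ (List.Lex (· < ·) a b ∨ a = b) := by
  rw [le_iff_lt_or_eq]; exact Eq.to_iff rfl

lemma pvLcp_sandwich (a b c : List String) (hab : a ≤ b) (hbc : b ≤ c) :
    pvLcp a c ≤ pvLcp a b := by
  have hb := pvBetween (pvLcp a c) a b c ((pvLe_iff a b).mp hab) ((pvLe_iff b c).mp hbc)
    (pvTake_lcp a c)
  by_cases hae : a = b
  · subst hae; rw [pvLcp_self]; exact pvLcp_le a c
  · exact (pvTake_eq_iff a b (pvLcp a c) hae).mp hb.symm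

-- adjacent condition computed by B's fold
def pvAdj (m : Nat) : List (List String) → Prop
  | a :: b :: rest => pvLcp a b < m ∧ pvAdj m (b :: rest)
  | _ => True

lemma pvAdj_iff_pairwise (m : Nat) (l : List (List String)) (hs : l.Pairwise (· ≤ ·)) :
    pvAdj m l ↔ l.Pairwise (fun a b => pvLcp a b < m) := by
  induction l with
  | nil => simp [pvAdj]
  | cons a t ih =>
    cases t with
    | nil => simp [pvAdj]
    | cons b rest =>
      have hs' := List.pairwise_cons.mp hs
      have ihr := ih hs'.2
      show (pvLcp a b < m ∧ pvAdj m (b :: rest)) ↔ _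
      constructor
      · rintro ⟨hlab, hp⟩
        rw [ihr] at hp
        refine List.pairwise_cons.mpr ⟨fun u hu => ?_, hp⟩
        rcases List.mem_cons.mp hu with rfl | hu'
        · exact hlab
        · have hab : a ≤ b := hs'.1 b (by simp)
          have hbu : b ≤ u := (List.pairwise_cons.mp hs'.2).1 u hu'
          exact lt_of_le_of_lt (pvLcp_sandwich a b u hab hbu) hlab
      · intro hp
        have h1 := List.pairwise_cons.mp hp
        exact ⟨h1.1 b (by simp), ihr.mpr h1.2⟩

lemma pvBestLoop_lt (l : List (List String)) : ∀ (best m : Nat),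
    (pvBestLoop l best < m ↔ best < m ∧ pvAdj m l) := by
  induction l with
  | nil => intro best m; simp [pvBestLoop, pvAdj]
  | cons a t ih =>
    cases t with
    | nil => intro best m; simp [pvBestLoop, pvAdj]
    | cons b rest =>
      intro best m
      show pvBestLoop (b :: rest) (max best (pvLcp a b)) < m ↔ best < m ∧ (pvLcp a b < m ∧ pvAdj m (b :: rest))
      rw [ih, Nat.max_lt]
      tauto

-- set-cardinality test of A = Nodup
lemma pvSetLen (xs : List String) :
    (PySem.Set.ofList xs).length = xs.length ↔ xs.Nodup := by
  constructor
  · intro h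
    have hsub : PySem.Set.ofList xs ⊆ xs := fun a ha => (PySem.Set.mem_ofList xs a).mp ha
    have hperm := ((PySem.Set.nodup_ofList xs).subperm hsub).perm_of_length_le (by omega)
    exact hperm.nodup (PySem.Set.nodup_ofList xs)
  · intro h
    rw [PySem.Set.ofList_eq_self_of_nodup xs h]

-- Pairwise transfer along a pointwise iff that may assume distinctness
lemma pvPairwiseNe {α : Type} {l : List α} {P Q : α → α → Prop} (hnd : l.Nodup)
    (h : ∀ a ∈ l, ∀ b ∈ l, a ≠ b → (P a b ↔ Q a b)) : (l.Pairwise P ↔ l.Pairwise Q) := by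
  constructor
  · intro hp
    exact (hnd.and hp).imp_of_mem (fun {a b} ha hb hab => (h a ha b hb hab.1).mp hab.2)
  · intro hq
    exact (hnd.and hq).imp_of_mem (fun {a b} ha hb hab => (h a ha b hb hab.1).mpr hab.2)

-- the master characterisation: under Pre_, A's stopping test at prefix length m holds iff
-- m exceeds B's maximal adjacent common prefix of the sorted word lists
lemma pvKey (items : List String) (hnd : (items.map PySem.Str.split₀).Nodup) (m : Nat) (hm : 1 ≤ m) :
    ((items.map PySem.Str.split₀).map (fun w => PySem.Str.join " " (w.take m))).Nodup ↔
      pvBestLoop (@PySem.List.sorted (List String) (List String) List.instLinearOrder.toLT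
        LinearOrder.toDecidableLT (items.map PySem.Str.split₀) (fun x => x) false) 0 < m := by
  set W := items.map PySem.Str.split₀ with hW
  have hgood : ∀ w ∈ W, ∀ s ∈ w, s.toList ≠ [] ∧ ' ' ∉ s.toList := by
    intro w hw
    obtain ⟨q, _, rfl⟩ := List.mem_map.mp hw
    exact pvSplitWords q
  -- Nodup of the joined prefixes ↔ Pairwise (pvLcp < m)
  have h1 : ((W.map (fun w => PySem.Str.join " " (w.take m))).Nodup ↔
      W.Pairwise (fun u v => pvLcp u v < m)) := by
    rw [List.Nodup, List.pairwise_map]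
    refine pvPairwiseNe hnd ?_
    intro u hu v hv huv
    constructor
    · intro hne
      by_contra hle
      rw [Nat.not_lt] at hle
      exact hne (congrArg (PySem.Str.join " ")
        ((pvTake_eq_iff u v m huv).mpr hle))
    · intro hlt hje
      have hte := pvJoinInj (u.take m) (v.take m)
        (fun s hs => hgood u hu s (List.mem_of_mem_take hs))
        (fun s hs => hgood v hv s (List.mem_of_mem_take hs)) hje
      have := (pvTake_eq_iff u v m huv).mp hte
      omega
  rw [h1]
  -- move to the sorted list (the predicate is symmetric)
  have hperm := @PySem.List.sorted_perm (List String) (List String) List.instLinearOrder.toLT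
    LinearOrder.toDecidableLT W (fun x => x) false
  have hsym : ∀ {x y : List String}, pvLcp x y < m → pvLcp y x < m := by
    intro x y h; rwa [pvLcp_comm] at h
  rw [← List.Perm.pairwise_iff hsym hperm]
  rw [← pvAdj_iff_pairwise m _ (PySem.List.sorted_pairwise W (fun x => x))]
  rw [pvBestLoop_lt]
  exact ⟨fun h => ⟨hm, h⟩, fun h => h.2⟩

-- A's loop, started at prefix length k, returns exactly B's value
lemma pvLoop (items : List String) (hnd : (items.map PySem.Str.split₀).Nodup) :
    ∀ (fuel k : Nat), 1 ≤ k →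
    k ≤ pvBestLoop (@PySem.List.sorted (List String) (List String) List.instLinearOrder.toLT
        LinearOrder.toDecidableLT (items.map PySem.Str.split₀) (fun x => x) false) 0 + 1 →
    pvBestLoop (@PySem.List.sorted (List String) (List String) List.instLinearOrder.toLT
        LinearOrder.toDecidableLT (items.map PySem.Str.split₀) (fun x => x) false) 0 + 1 ≤ k + fuel →
    pvALoop items fuel (k : Int) =
      (pvBestLoop (@PySem.List.sorted (List String) (List String) List.instLinearOrder.toLT
        LinearOrder.toDecidableLT (items.map PySem.Str.split₀) (fun x => x) false) 0 : Int) + 1 := by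
  intro fuel
  induction fuel with
  | zero =>
    intro k hk1 hkM hMk
    have : k = _ + 1 := le_antisymm hkM (by omega)
    simp only [pvALoop]
    rw [this]
    push_cast
    ring
  | succ fuel ih =>
    intro k hk1 hkM hMk
    simp only [pvALoop]
    have hsl : (items.map (fun q =>
        PySem.Str.join " " (PySem.List.slice (PySem.Str.split₀ q) (some 0) (some (k : Int))))) =
        (items.map PySem.Str.split₀).map (fun w => PySem.Str.join " " (w.take k)) := by
      rw [List.map_map]
      refine List.map_congr_left ?_
      intro q _
      simp [PySem.List.slice_zero_start, PySem.List.slice_to_natCast]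
    rw [hsl]
    have hlen : ((items.map PySem.Str.split₀).map (fun w => PySem.Str.join " " (w.take k))).length
        = items.length := by simp
    by_cases hcond : pvBestLoop (@PySem.List.sorted (List String) (List String) List.instLinearOrder.toLT
        LinearOrder.toDecidableLT (items.map PySem.Str.split₀) (fun x => x) false) 0 < k
    · have hnodup := (pvKey items hnd k hk1).mpr hcond
      have hc1 : (PySem.Set.ofList ((items.map PySem.Str.split₀).map
          (fun w => PySem.Str.join " " (w.take k)))).length = items.length := by
        rw [PySem.Set.ofList_eq_self_of_nodup _ hnodup, hlen]
      rw [if_pos hc1]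
      have hkeq : k = pvBestLoop (@PySem.List.sorted (List String) (List String) List.instLinearOrder.toLT
          LinearOrder.toDecidableLT (items.map PySem.Str.split₀) (fun x => x) false) 0 + 1 := by omega
      rw [hkeq]; push_cast; ring
    · have hnotnodup : ¬ ((items.map PySem.Str.split₀).map (fun w => PySem.Str.join " " (w.take k))).Nodup :=
        fun hh => hcond ((pvKey items hnd k hk1).mp hh)
      rw [if_neg (by
        intro heq
        exact hnotnodup ((pvSetLen _).mp (by rw [hlen]; exact heq)))]
      have hcast : (k : Int) + 1 = ((k + 1 : Nat) : Int) := by push_cast; ring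
      rw [hcast]
      exact ih (k + 1) (by omega) (by omega) (by omega)

-- ===== VERDICT (by name: the statement is the Claim_ definition above) =====
theorem get_min_length_for_unique_items_spec : Claim_equal_get_min_length_for_unique_items := by
  intro items _ hpre
  unfold Spec_get_min_length_for_unique_items
  unfold Pre_get_min_length_for_unique_items at hpre
  unfold get_min_length_for_unique_items get_min_length_for_unique_items_alt
  show pvALoop items (items.foldl (fun acc q => max acc (PySem.Str.split₀ q).length) 0 + 1) 1 =
    (pvBestLoop (@PySem.List.sorted (List String) (List String) List.instLinearOrder.toLT
      LinearOrder.toDecidableLT (items.map (fun q => PySem.Str.split₀ q)) (fun x => x) false) 0 : Int) + 1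
  have hmapeq : items.map (fun q => PySem.Str.split₀ q) = items.map PySem.Str.split₀ := rfl
  rw [hmapeq]
  -- bound: the maximal adjacent common prefix is at most the maximal word count
  have hbound : pvBestLoop (@PySem.List.sorted (List String) (List String) List.instLinearOrder.toLT
      LinearOrder.toDecidableLT (items.map PySem.Str.split₀) (fun x => x) false) 0 <
      items.foldl (fun acc q => max acc (PySem.Str.split₀ q).length) 0 + 1 := by
    refine (pvKey items hpre _ (by omega)).mp ?_
    have htake : (items.map PySem.Str.split₀).map (fun w => PySem.Str.join " "
        (w.take (items.foldl (fun acc q => max acc (PySem.Str.split₀ q).length) 0 + 1))) =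
        (items.map PySem.Str.split₀).map (fun w => PySem.Str.join " " w) := by
      refine List.map_congr_left ?_
      intro w hw
      obtain ⟨q, hq, rfl⟩ := List.mem_map.mp hw
      have hle : (PySem.Str.split₀ q).length ≤
          items.foldl (fun acc q => max acc (PySem.Str.split₀ q).length) 0 :=
        (PySem.List.le_foldl_max_nat items (fun q => (PySem.Str.split₀ q).length) 0).2 q hq
      rw [List.take_of_length_le (by omega)]
    rw [htake]
    rw [List.Nodup, List.pairwise_map]
    refine (pvPairwiseNe hpre ?_).mp hpre
    intro u hu v hv huv
    constructor
    · intro hne hje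
      exact hne (pvJoinInj u v
        (fun s hs => by
          obtain ⟨q, _, rfl⟩ := List.mem_map.mp hu
          exact pvSplitWords q s hs)
        (fun s hs => by
          obtain ⟨q, _, rfl⟩ := List.mem_map.mp hv
          exact pvSplitWords q s hs) hje)
    · intro hne; exact fun he => hne (he ▸ rfl)
  have hone : (1 : Int) = ((1 : Nat) : Int) := rfl
  rw [hone]
  exact pvLoop items hpre _ 1 (by omega) (by omega) (by omega)
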